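-- pv_equiv track=rewrite | github.com/pypi-data/pypi-mirror-18 | packages/twitter2rss/twitter2rss-0.2.1.3.tar.gz/twitter2rss-0.2.1.3/twitter2rss.py | mark_as_retweet
-- ===== SOURCE A (Python) =====
-- def mark_as_retweet(tweets):
--     """
--     Mark tweet as retweet seeking a concrete number.
--
--     tweets -- list of strings containing sanitized tweets
--     return -- list of strings maked as retweets with the '♻' symbol
--     """
--
--     coincidence = []
--     for num in enumerate(tweets):
--         if '59bcc3ad6775562f845953cf01624225' in num[1]:
--             coincidence.append(num[0])
--     for coinc in coincidence:
--         if coinc + 1 < len(tweets):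
--             tweets[coinc+1] = '♻' + tweets[coinc+1]
--     for coinc in reversed(coincidence):
--         tweets.pop(coinc)
--
--     return tweets
-- ===== SOURCE B (Python) =====
-- MAGIC = '59bcc3ad6775562f845953cf01624225'
--
-- def mark_as_retweet(tweets):
--     # One rebuilding pass: drop marker lines, prepend the symbol to the line
--     # that follows a marker.  (A mutates its argument in place; this returns
--     # a fresh list with the same return value.)
--     out = []
--     prev_marker = False
--     for t in tweets:
--         if MAGIC in t:
--             prev_marker = True
--         else:
--             out.append('♻' + t if prev_marker else t)
--             prev_marker = False
--     return out
-- ===== Notes on version B (the rewrite author's own statement) =====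
-- stated objective: simpler
-- what changed: Replaced A's three passes (collect marker indices, index-assign the symbol after each marker, then pop each marker line) by one linear pass that rebuilds the list, skipping marker lines and prepending the symbol to the element that follows a marker; the equivalence is about the return value (A also mutates its argument in place, B does not).
import Mathlib
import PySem

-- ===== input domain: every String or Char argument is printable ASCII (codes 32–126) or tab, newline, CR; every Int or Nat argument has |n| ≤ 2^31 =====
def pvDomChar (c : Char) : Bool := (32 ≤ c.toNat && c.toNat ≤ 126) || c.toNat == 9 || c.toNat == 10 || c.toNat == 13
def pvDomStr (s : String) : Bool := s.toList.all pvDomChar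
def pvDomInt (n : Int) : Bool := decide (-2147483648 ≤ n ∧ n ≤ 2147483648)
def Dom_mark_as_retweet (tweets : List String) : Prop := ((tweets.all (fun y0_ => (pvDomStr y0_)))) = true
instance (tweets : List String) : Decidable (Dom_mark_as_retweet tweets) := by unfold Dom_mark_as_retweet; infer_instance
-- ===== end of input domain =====

-- B rebuilds the result in one pass (skip marker lines, prepend the symbol to the line that
-- follows a marker) instead of A's three passes with index assignment and repeated pops;
-- A mutates its argument in place, so the equivalence proved here is about the RETURN value.


-- the magic hash constant '59bcc3ad6775562f845953cf01624225'
def pvHash : String := "59bcc3ad6775562f845953cf01624225"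

-- ===== PORT A =====
def mark_as_retweet (tweets : List String) : List String :=
  -- coincidence = []; for num in enumerate(tweets): if HASH in num[1]: coincidence.append(num[0])
  let coincidence : List Int :=
    (PySem.List.enumerate tweets 0).foldl
      (fun acc num => if PySem.Str.isIn pvHash num.2 then acc ++ [num.1] else acc) []
  -- for coinc in coincidence: if coinc+1 < len(tweets): tweets[coinc+1] = '♻' + tweets[coinc+1]
  let tweets2 : List String :=
    coincidence.foldl
      (fun l coinc =>
        if coinc + 1 < (l.length : Int) then
          PySem.List.pySetD l (coinc + 1) ("♻" ++ PySem.List.pyGetD l (coinc + 1) "")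
        else l) tweets
  -- for coinc in reversed(coincidence): tweets.pop(coinc)   (pop always in range; getD is a totality guard)
  coincidence.reverse.foldl
    (fun l coinc => ((PySem.List.pop? l coinc).map (·.2)).getD l) tweets2

-- ===== PORT B =====
def mark_as_retweet_alt (tweets : List String) : List String :=
  (tweets.foldl
    (fun (st : List String × Bool) t =>
      if PySem.Str.isIn pvHash t then (st.1, true)
      else (st.1 ++ [if st.2 then "♻" ++ t else t], false))
    ([], false)).1

-- ===== PRECONDITION & SPEC =====
def Spec_mark_as_retweet (tweets : List String) (out : List String) : Prop := out = mark_as_retweet_alt tweets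
instance (tweets : List String) (out : List String) : Decidable (Spec_mark_as_retweet tweets out) := by unfold Spec_mark_as_retweet; infer_instance

-- ===== CLAIM (what is proved, stated in full; the proofs are below) =====
def Claim_equal_mark_as_retweet : Prop := ∀ (tweets : List String), Dom_mark_as_retweet tweets → Spec_mark_as_retweet tweets (mark_as_retweet tweets)

-- ===== LEMMAS AND PROOFS =====

-- whether a line is a marker line
def pvMarker (t : String) : Bool := PySem.Str.isIn pvHash t

-- reference recursion: B's single pass (flag = previous line was a marker)
def pvGo : Bool → List String → List String
  | _, [] => []
  | p, t :: ts =>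
    if pvMarker t then pvGo true ts
    else (if p then "♻" ++ t else t) :: pvGo false ts

-- Nat-valued marker indices, structurally
def pvIdx : List String → List Nat
  | [] => []
  | t :: ts => (if pvMarker t then [0] else []) ++ (pvIdx ts).map (· + 1)

-- A's second pass step
def pvStep2 (l : List String) (c : Int) : List String :=
  if c + 1 < (l.length : Int) then
    PySem.List.pySetD l (c + 1) ("♻" ++ PySem.List.pyGetD l (c + 1) "")
  else l

-- A's third pass step
def pvStep3 (l : List String) (c : Int) : List String :=
  ((PySem.List.pop? l c).map (·.2)).getD l

-- mark the head of a list (what A's second pass has already done to the tail when a marker precedes it)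
def pvDec : Bool → List String → List String
  | false, l => l
  | true, [] => []
  | true, t :: ts => ("♻" ++ t) :: ts

theorem pvDec_cons (p : Bool) (t : String) (ts : List String) :
    pvDec p (t :: ts) = (if p then "♻" ++ t else t) :: ts := by
  cases p <;> rfl

theorem pvGo_fold (ts : List String) (acc : List String) (p : Bool) :
    (ts.foldl
      (fun (st : List String × Bool) t =>
        if PySem.Str.isIn pvHash t then (st.1, true)
        else (st.1 ++ [if st.2 then "♻" ++ t else t], false))
      (acc, p)).1 = acc ++ pvGo p ts := by
  induction ts generalizing acc p with
  | nil => simp [pvGo]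
  | cons t ts ih =>
    by_cases h : PySem.Str.isIn pvHash t
    · simp only [List.foldl_cons, h, if_true, ih, pvGo, pvMarker]
    · simp only [List.foldl_cons, h, if_false, Bool.false_eq_true, ih, pvGo, pvMarker,
        List.append_assoc, List.singleton_append]

-- index shift under the Nat → Int cast
theorem pvCastShift (cs : List Nat) (s : Int) :
    ((cs.map (· + 1)).map (fun (n : Nat) => (n : Int) + s)) = cs.map (fun (n : Nat) => (n : Int) + (s + 1)) := by
  rw [List.map_map]
  refine List.map_congr_left (fun n _ => ?_)
  simp only [Function.comp_apply]
  push_cast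
  ring

-- coincidence = (pvIdx ts).map cast, shifted by the enumerate start
theorem pvIdx_enumerate (ts : List String) (s : Int) :
    ((PySem.List.enumerate ts s).filter (fun num => pvMarker num.2)).map (·.1)
      = (pvIdx ts).map (fun (n : Nat) => (n : Int) + s) := by
  induction ts generalizing s with
  | nil => rw [PySem.List.enumerate_nil]; rfl
  | cons t ts ih =>
    rw [PySem.List.enumerate_cons, pvIdx]
    by_cases h : pvMarker t
    · rw [List.filter_cons_of_pos (by simpa using h), List.map_cons, ih, h, if_pos rfl,
          List.singleton_append, List.map_cons, pvCastShift]
      norm_num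
    · have h' : pvMarker t = false := by simpa using h
      rw [List.filter_cons_of_neg (by simpa using h), ih, h', if_neg (by simp),
          List.nil_append, pvCastShift]

-- positions touched by both passes are successor indices, so they skip the head
theorem pvStep2_cons (t : String) (l : List String) (n : Nat) :
    pvStep2 (t :: l) ((n : Int) + 1) = t :: pvStep2 l ((n : Int)) := by
  unfold pvStep2
  rw [show (n : Int) + 1 + 1 = ((n + 2 : Nat) : Int) by push_cast; ring,
      show (n : Int) + 1 = ((n + 1 : Nat) : Int) by push_cast; ring,
      PySem.List.pySetD_natCast, PySem.List.pySetD_natCast,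
      PySem.List.pyGetD_natCast, PySem.List.pyGetD_natCast]
  split_ifs with ha hb hb
  · rw [show n + 2 = (n + 1) + 1 from rfl, List.set_cons_succ, List.getD_cons_succ]
  · exfalso; push_cast at ha hb; simp [List.length_cons] at ha; omega
  · exfalso; push_cast at ha hb; simp [List.length_cons] at ha; omega
  · rfl

theorem pvStep3_cons (t : String) (l : List String) (n : Nat) :
    pvStep3 (t :: l) ((n : Int) + 1) = t :: pvStep3 l ((n : Int)) := by
  unfold pvStep3
  rw [show (n : Int) + 1 = ((n + 1 : Nat) : Int) by push_cast; ring]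
  by_cases h : n < l.length
  · rw [PySem.List.pop?_natCast (t :: l) (n + 1) (by simp; omega),
        PySem.List.pop?_natCast l n h]
    simp
  · have hA : PySem.List.pop? (t :: l) (((n + 1 : Nat) : Int)) = none := by
      simp only [PySem.List.pop?, PySem.List.pyIdx?, List.length_cons]
      rw [if_pos (by positivity), if_neg (by push_cast; omega)]
      rfl
    have hB : PySem.List.pop? l ((n : Int)) = none := by
      simp only [PySem.List.pop?, PySem.List.pyIdx?]
      rw [if_pos (by positivity), if_neg (by omega)]
      rfl
    rw [hA, hB]
    rfl

-- fold of a head-skipping step over successor indices skips the head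
theorem pvFold_cons (f : List String → Int → List String)
    (hf : ∀ (t : String) (l : List String) (n : Nat), f (t :: l) ((n : Int) + 1) = t :: f l ((n : Int)))
    (cs : List Nat) (t : String) (l : List String) :
    ((cs.map (fun (n : Nat) => (n : Int) + 1)).foldl f (t :: l))
      = t :: ((cs.map (fun (n : Nat) => (n : Int))).foldl f l) := by
  induction cs generalizing l with
  | nil => rfl
  | cons c cs ih =>
    rw [List.map_cons, List.map_cons, List.foldl_cons, List.foldl_cons, hf, ih]

-- the main invariant: A's three passes, run on a list whose head is already marked when
-- the flag is set, produce B's single pass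
theorem pvMain (ts : List String) (p : Bool) :
    (((pvIdx ts).map (fun (n : Nat) => (n : Int))).reverse.foldl pvStep3
      (((pvIdx ts).map (fun (n : Nat) => (n : Int))).foldl pvStep2 (pvDec p ts)))
      = pvGo p ts := by
  induction ts generalizing p with
  | nil => cases p <;> rfl
  | cons t ts ih =>
    have hsucc : ((pvIdx ts).map (· + 1)).map (fun (n : Nat) => (n : Int))
        = (pvIdx ts).map (fun (n : Nat) => (n : Int) + 1) := by
      have h0 := pvCastShift (pvIdx ts) 0
      simp only [add_zero] at h0
      exact h0
    rw [pvDec_cons, pvIdx]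
    by_cases hm : pvMarker t
    · rw [hm, if_pos rfl, List.singleton_append, List.map_cons, List.foldl_cons]
      simp only [Nat.cast_zero]
      cases ts with
      | nil =>
        have h2 : pvStep2 [if p = true then "♻" ++ t else t] 0 =
            [if p = true then "♻" ++ t else t] := by
          unfold pvStep2; rw [if_neg (by simp)]
        simp only [pvIdx, List.map_nil, List.foldl_nil, List.reverse_cons,
          List.reverse_nil, List.nil_append, List.foldl_cons, h2]
        show pvStep3 [if p = true then "♻" ++ t else t] 0 = pvGo p [t]
        cases p <;> simp [pvStep3, pvGo, hm, PySem.List.pop?_zero_cons]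
      | cons u us =>
        have h2 : pvStep2 ((if p = true then "♻" ++ t else t) :: u :: us) 0
            = (if p = true then "♻" ++ t else t) :: pvDec true (u :: us) := by
          unfold pvStep2
          rw [if_pos (by simp)]
          rw [show ((0 : Int) + 1) = ((1 : Nat) : Int) by norm_num,
              PySem.List.pySetD_natCast, PySem.List.pyGetD_natCast]
          rfl
        rw [h2, hsucc, pvFold_cons pvStep2 pvStep2_cons,
            List.reverse_cons, List.foldl_append, ← List.map_reverse,
            pvFold_cons pvStep3 pvStep3_cons, List.foldl_cons, List.foldl_nil]
        show pvStep3 (_ :: _) 0 = _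
        rw [show pvStep3
              ((if p = true then "♻" ++ t else t) ::
                ((pvIdx (u :: us)).reverse.map (fun (n : Nat) => (n : Int))).foldl pvStep3
                  (((pvIdx (u :: us)).map (fun (n : Nat) => (n : Int))).foldl pvStep2
                    (pvDec true (u :: us))))
              0
            = ((pvIdx (u :: us)).reverse.map (fun (n : Nat) => (n : Int))).foldl pvStep3
                (((pvIdx (u :: us)).map (fun (n : Nat) => (n : Int))).foldl pvStep2
                  (pvDec true (u :: us)))
          by simp [pvStep3, PySem.List.pop?_zero_cons]]
        rw [← List.map_reverse] at ih
        rw [ih true]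
        cases p <;> simp [pvGo, hm]
    · have hm' : pvMarker t = false := by simpa using hm
      rw [hm', if_neg Bool.false_ne_true, List.nil_append, hsucc,
          pvFold_cons pvStep2 pvStep2_cons, ← List.map_reverse,
          pvFold_cons pvStep3 pvStep3_cons]
      rw [← List.map_reverse] at ih
      have := ih false
      simp only [pvDec] at this
      rw [this]
      cases p <;> simp [pvGo, hm']

-- ===== VERDICT (by name: the statement is the Claim_ definition above) =====
theorem mark_as_retweet_spec : Claim_equal_mark_as_retweet := by
  unfold Claim_equal_mark_as_retweet
  intro tweets _
  unfold Spec_mark_as_retweet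
  show mark_as_retweet tweets = mark_as_retweet_alt tweets
  unfold mark_as_retweet mark_as_retweet_alt
  rw [PySem.List.foldl_append_if (fun (num : Int × String) => PySem.Str.isIn pvHash num.2)
        (fun (num : Int × String) => num.1), List.nil_append]
  rw [show (fun (num : Int × String) => PySem.Str.isIn pvHash num.2)
        = (fun (num : Int × String) => pvMarker num.2) from rfl,
      pvIdx_enumerate tweets 0]
  rw [show (pvIdx tweets).map (fun (n : Nat) => (n : Int) + 0)
        = (pvIdx tweets).map (fun (n : Nat) => (n : Int)) by simp]
  rw [pvGo_fold tweets [] false, List.nil_append]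
  have := pvMain tweets false
  simp only [pvDec] at this
  exact this
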